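-- pv_equiv track=rewrite | github.com/bmenrigh/aoc_2025 | day_10/solve_b.py | solve_with_m
-- ===== SOURCE A (Python) =====
-- def solve_with_m(goal, buttons_i, m, d, u, c):
--
--     if d >= len(buttons_i) or m == u:
--         if c == goal:
--             return True
--         else:
--             return False
--
--     if any([z[1] > z[0] for z in zip(goal, c)]):
--         return False
--
--     if solve_with_m(goal, buttons_i, m, d + 1, u, c):
--         return True
--
--     s = 1
--     if d == len(buttons_i) - 1:
--         s = (m - u)
--
--     for i in range(s, (m - u) + 1):
--         if solve_with_m(goal, buttons_i, m, d + 1, u + i, [sum(p) for p in zip(c, buttons_i[d][i - 1])]):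
--             return True
--
--
--     return False
-- ===== SOURCE B (Python) =====
-- def solve_with_m(goal, buttons_i, m, d, u, c):
--     # Iterative layered search (BFS over depths) with per-layer dedup of states,
--     # instead of A's naive depth-first recursion.
--     n = len(buttons_i)
--     frontier = [(u, tuple(c))]
--     dd = d
--     while dd < n and frontier:
--         nxt = []
--         seen = set()
--         for uu, cc in frontier:
--             if m == uu:
--                 if list(cc) == goal:
--                     return True
--                 continue
--             if any(cj > gj for gj, cj in zip(goal, cc)):
--                 continue
--             if (uu, cc) not in seen:
--                 seen.add((uu, cc))
--                 nxt.append((uu, cc))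
--             s = (m - uu) if dd == n - 1 else 1
--             for i in range(s, m - uu + 1):
--                 st = (uu + i, tuple(a + b for a, b in zip(cc, buttons_i[dd][i - 1])))
--                 if st not in seen:
--                     seen.add(st)
--                     nxt.append(st)
--         frontier = nxt
--         dd += 1
--     return any(list(cc) == goal for uu, cc in frontier)
-- ===== Notes on version B (the rewrite author's own statement) =====
-- stated objective: alternative
-- what changed: B replaces A's depth-first recursion by an iterative breadth-first search over depths, keeping a frontier of (presses, counter) states per layer and deduplicating it with a set so identical subproblems are expanded once.
-- outside the precondition, e.g. on solve_with_m([0], [[[]], [[], [], []], [[], [], []]], -1, 2, -3, []): A returns False, B returns False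
import Mathlib
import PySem

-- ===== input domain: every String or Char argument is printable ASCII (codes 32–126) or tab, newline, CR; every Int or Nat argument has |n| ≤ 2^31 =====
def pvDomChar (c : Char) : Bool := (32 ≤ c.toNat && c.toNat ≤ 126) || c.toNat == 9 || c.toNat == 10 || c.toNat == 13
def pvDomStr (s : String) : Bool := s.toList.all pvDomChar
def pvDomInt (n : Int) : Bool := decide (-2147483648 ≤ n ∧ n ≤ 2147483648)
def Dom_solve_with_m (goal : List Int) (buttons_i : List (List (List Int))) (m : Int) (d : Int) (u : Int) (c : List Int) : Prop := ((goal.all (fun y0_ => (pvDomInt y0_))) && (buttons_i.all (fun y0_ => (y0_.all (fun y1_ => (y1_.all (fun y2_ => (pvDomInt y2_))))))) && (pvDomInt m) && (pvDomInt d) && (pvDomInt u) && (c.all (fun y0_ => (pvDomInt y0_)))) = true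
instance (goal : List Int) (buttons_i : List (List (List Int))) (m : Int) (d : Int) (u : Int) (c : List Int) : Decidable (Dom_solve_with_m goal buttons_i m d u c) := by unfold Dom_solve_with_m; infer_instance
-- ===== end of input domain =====

-- B replaces A's depth-first recursion by an iterative layered (breadth-first) search
-- over depths with per-layer deduplication of (presses, counter) states; same return
-- value wherever A returns inside Pre_.

-- ===== PORT A =====
def solve_with_m (goal : List Int) (buttons_i : List (List (List Int))) (m : Int) (d : Int) (u : Int) (c : List Int) : Bool :=
  if h : d ≥ (buttons_i.length : Int) ∨ m = u then
    c == goal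
  else if (goal.zip c).any (fun z => decide (z.2 > z.1)) then
    false
  else if solve_with_m goal buttons_i m (d + 1) u c then
    true
  else
    let s : Int := if d = (buttons_i.length : Int) - 1 then m - u else 1
    -- buttons_i[d][i-1]: the `.getD []` fallbacks are only reached where Python raises
    -- IndexError (outside Pre_); `any` is the for-loop's early `return True`.
    (PySem.List.pyRange s (m - u + 1) 1).any (fun i =>
      solve_with_m goal buttons_i m (d + 1) (u + i)
        ((c.zip (((PySem.List.pyGet? buttons_i d).getD []) |> (fun row => (PySem.List.pyGet? row (i - 1)).getD []))).map
          (fun p => p.1 + p.2)))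
termination_by ((buttons_i.length : Int) - d).toNat
decreasing_by all_goals (simp only [not_or, not_le] at h; omega)

-- ===== PORT B =====
-- the successor state `st` computed in the inner for-loop of Source B
def pvChild (buttons_i : List (List (List Int))) (dd uu : Int) (cc : List Int) (i : Int) : Int × List Int :=
  (uu + i,
   (cc.zip (((PySem.List.pyGet? buttons_i dd).getD []) |> (fun row => (PySem.List.pyGet? row (i - 1)).getD []))).map
     (fun p => p.1 + p.2))

-- the `for uu, cc in frontier:` loop of Source B: threads the deduplicated next layer `nxt`
-- (the Python `seen` set is exactly the members of `nxt`, so `seen`+append = Set.add);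
-- first component true = the early `return True` on a terminal state matching goal.
def pvExpand (goal : List Int) (buttons_i : List (List (List Int))) (m : Int) (nn : Int) (dd : Int) :
    List (Int × List Int) → List (Int × List Int) → Bool × List (Int × List Int)
  | [], nxt => (false, nxt)
  | (uu, cc) :: rest, nxt =>
    if m = uu then
      if cc == goal then (true, nxt)
      else pvExpand goal buttons_i m nn dd rest nxt
    else if (goal.zip cc).any (fun z => decide (z.2 > z.1)) then
      pvExpand goal buttons_i m nn dd rest nxt
    else
      let s : Int := if dd = nn - 1 then m - uu else 1
      let nxt1 := PySem.Set.add nxt (uu, cc)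
      let nxt2 := (PySem.List.pyRange s (m - uu + 1) 1).foldl
        (fun acc i => PySem.Set.add acc (pvChild buttons_i dd uu cc i)) nxt1
      pvExpand goal buttons_i m nn dd rest nxt2

-- the `while dd < n and frontier:` loop of Source B
def pvLayers (goal : List Int) (buttons_i : List (List (List Int))) (m : Int) (nn : Int)
    (dd : Int) (frontier : List (Int × List Int)) : Bool :=
  if h : dd < nn ∧ frontier ≠ [] then
    let p := pvExpand goal buttons_i m nn dd frontier []
    if p.1 then true
    else pvLayers goal buttons_i m nn (dd + 1) p.2
  else frontier.any (fun st => st.2 == goal)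
termination_by (nn - dd).toNat
decreasing_by omega

def solve_with_m_alt (goal : List Int) (buttons_i : List (List (List Int))) (m : Int) (d : Int) (u : Int) (c : List Int) : Bool :=
  pvLayers goal buttons_i m (buttons_i.length : Int) d [(u, c)]

-- ===== PRECONDITION & SPEC =====
-- Pre_ excludes the inputs on which the recursion can reach an out-of-range index into
-- buttons_i (d below -len(buttons_i), negative remaining presses m-u, or a button row
-- shorter than m-u): there A may raise IndexError, or its value relies on Python's
-- accidental negative-index wraparound.
def Pre_solve_with_m (goal : List Int) (buttons_i : List (List (List Int))) (m : Int) (d : Int) (u : Int) (c : List Int) : Prop :=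
  (d ≥ (buttons_i.length : Int) ∨ m = u)
  ∨ ((goal.zip c).any (fun z => decide (z.2 > z.1)) = true)
  ∨ (-(buttons_i.length : Int) ≤ d ∧ 0 ≤ m - u ∧ ∀ row ∈ buttons_i, m - u ≤ (row.length : Int))
instance (goal : List Int) (buttons_i : List (List (List Int))) (m : Int) (d : Int) (u : Int) (c : List Int) : Decidable (Pre_solve_with_m goal buttons_i m d u c) := by unfold Pre_solve_with_m; infer_instance

def pvWitness_solve_with_m : List Int × List (List (List Int)) × Int × Int × Int × List Int :=
  ([1], [[[1]]], 1, 0, 0, [0])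

def Spec_solve_with_m (goal : List Int) (buttons_i : List (List (List Int))) (m : Int) (d : Int) (u : Int) (c : List Int) (out : Bool) : Prop := out = solve_with_m_alt goal buttons_i m d u c
instance (goal : List Int) (buttons_i : List (List (List Int))) (m : Int) (d : Int) (u : Int) (c : List Int) (out : Bool) : Decidable (Spec_solve_with_m goal buttons_i m d u c out) := by unfold Spec_solve_with_m; infer_instance

-- ===== CLAIM (what is proved, stated in full; the proofs are below) =====
def Claim_equal_solve_with_m : Prop := ∀ (goal : List Int) (buttons_i : List (List (List Int))) (m : Int) (d : Int) (u : Int) (c : List Int), Dom_solve_with_m goal buttons_i m d u c → Pre_solve_with_m goal buttons_i m d u c → Spec_solve_with_m goal buttons_i m d u c (solve_with_m goal buttons_i m d u c)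

-- ===== LEMMAS AND PROOFS =====

-- a terminal state that succeeds immediately
def pvTerm (goal : List Int) (m : Int) (st : Int × List Int) : Bool :=
  decide (m = st.1) && (st.2 == goal)

def pvChildren (buttons_i : List (List (List Int))) (m : Int) (nn dd uu : Int) (cc : List Int) : List (Int × List Int) :=
  (PySem.List.pyRange (if dd = nn - 1 then m - uu else 1) (m - uu + 1) 1).map (pvChild buttons_i dd uu cc)

def pvStep (goal : List Int) (buttons_i : List (List (List Int))) (m : Int) (nn dd : Int) (st : Int × List Int) : List (Int × List Int) :=
  if m = st.1 then []
  else if (goal.zip st.2).any (fun z => decide (z.2 > z.1)) then []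
  else st :: pvChildren buttons_i m nn dd st.1 st.2

lemma pvAnyCongr {α : Type} {l : List α} {f g : α → Bool} (h : ∀ x ∈ l, f x = g x) :
    l.any f = l.any g := by
  induction l with
  | nil => rfl
  | cons a t ih =>
    simp only [List.any_cons]
    rw [h a (List.mem_cons_self), ih (fun x hx => h x (List.mem_cons_of_mem _ hx))]

lemma pvAnyExt {α : Type} {l l' : List α} (h : ∀ x, x ∈ l ↔ x ∈ l') (f : α → Bool) :
    l.any f = l'.any f := by
  rw [Bool.eq_iff_iff]
  simp only [List.any_eq_true]
  constructor
  · rintro ⟨x, hx, hf⟩; exact ⟨x, (h x).1 hx, hf⟩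
  · rintro ⟨x, hx, hf⟩; exact ⟨x, (h x).2 hx, hf⟩

lemma pvAnyFlatMap {α β : Type} (l : List α) (g : α → List β) (f : β → Bool) :
    (l.flatMap g).any f = l.any (fun x => (g x).any f) := by
  induction l with
  | nil => rfl
  | cons a t ih => simp [List.flatMap_cons, List.any_append, ih]

lemma pvMemFoldlAdd {α β : Type} [BEq α] [LawfulBEq α] (l : List β) (g : β → α) :
    ∀ (s : List α) (x : α), x ∈ l.foldl (fun acc i => PySem.Set.add acc (g i)) s ↔ x ∈ s ∨ ∃ i ∈ l, x = g i := by
  induction l with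
  | nil => simp
  | cons a t ih =>
    intro s x
    simp only [List.foldl_cons, ih, PySem.Set.mem_add, List.mem_cons]
    constructor
    · rintro (⟨h | h⟩ | ⟨i, hi, h⟩)
      · exact Or.inl h
      · exact Or.inr ⟨a, Or.inl rfl, h⟩
      · exact Or.inr ⟨i, Or.inr hi, h⟩
    · rintro (h | ⟨i, (rfl | hi), h⟩)
      · exact Or.inl (Or.inl h)
      · exact Or.inl (Or.inr h)
      · exact Or.inr ⟨i, hi, h⟩

lemma pvExpandFst (goal : List Int) (buttons_i : List (List (List Int))) (m : Int) (nn dd : Int) :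
    ∀ (F acc : List (Int × List Int)),
      (pvExpand goal buttons_i m nn dd F acc).1 = F.any (pvTerm goal m) := by
  intro F
  induction F with
  | nil => intro acc; rfl
  | cons st rest ih =>
    intro acc
    obtain ⟨uu, cc⟩ := st
    rw [pvExpand, List.any_cons]
    by_cases h1 : m = uu
    · by_cases h2 : (cc == goal) = true
      · simp [h1, h2, pvTerm]
      · have hb : (cc == goal) = false := Bool.eq_false_iff.mpr h2
        rw [if_pos h1, hb]
        simp only [Bool.false_eq_true, if_false]
        rw [ih acc]
        simp [pvTerm, hb]
    · have hterm : pvTerm goal m (uu, cc) = false := by simp [pvTerm, h1]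
      by_cases h2 : ((goal.zip cc).any fun z => decide (z.2 > z.1)) = true
      · rw [if_neg h1, if_pos h2, ih, hterm]; simp
      · rw [if_neg h1, if_neg h2, ih, hterm]; simp

lemma pvExpandSnd (goal : List Int) (buttons_i : List (List (List Int))) (m : Int) (nn dd : Int) :
    ∀ (F acc : List (Int × List Int)),
      (pvExpand goal buttons_i m nn dd F acc).1 = false →
      ∀ x, x ∈ (pvExpand goal buttons_i m nn dd F acc).2 ↔
           x ∈ acc ∨ x ∈ F.flatMap (pvStep goal buttons_i m nn dd) := by
  intro F
  induction F with
  | nil => intro acc _ x; simp [pvExpand]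
  | cons st rest ih =>
    intro acc hfalse x
    obtain ⟨uu, cc⟩ := st
    rw [pvExpand] at hfalse ⊢
    by_cases h1 : m = uu
    · by_cases h2 : (cc == goal) = true
      · rw [if_pos h1, if_pos h2] at hfalse; exact absurd hfalse (by simp)
      · have hb : (cc == goal) = false := Bool.eq_false_iff.mpr h2
        rw [if_pos h1, hb] at hfalse ⊢
        simp only [Bool.false_eq_true, if_false] at hfalse ⊢
        rw [ih acc hfalse x]
        have hstep : pvStep goal buttons_i m nn dd (uu, cc) = [] := by simp [pvStep, h1]
        rw [List.flatMap_cons, hstep, List.nil_append]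
    · rw [if_neg h1] at hfalse ⊢
      by_cases h2 : ((goal.zip cc).any fun z => decide (z.2 > z.1)) = true
      · rw [if_pos h2] at hfalse ⊢
        rw [ih acc hfalse x]
        have hstep : pvStep goal buttons_i m nn dd (uu, cc) = [] := by simp [pvStep, h1, h2]
        rw [List.flatMap_cons, hstep, List.nil_append]
      · rw [if_neg h2] at hfalse ⊢
        rw [ih _ hfalse x, pvMemFoldlAdd]
        simp only [PySem.Set.mem_add, List.flatMap_cons, List.mem_append, pvStep, if_neg h1,
          if_neg h2, List.mem_cons, pvChildren, List.mem_map]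
        constructor
        · rintro (((h | h) | ⟨i, hi, rfl⟩) | h)
          · exact Or.inl h
          · exact Or.inr (Or.inl (Or.inl h))
          · exact Or.inr (Or.inl (Or.inr ⟨i, hi, rfl⟩))
          · exact Or.inr (Or.inr h)
        · rintro (h | ((h | ⟨i, hi, rfl⟩) | h))
          · exact Or.inl (Or.inl (Or.inl h))
          · exact Or.inl (Or.inl (Or.inr h))
          · exact Or.inl (Or.inr ⟨i, hi, rfl⟩)
          · exact Or.inr h

-- A's value at a terminal state
lemma pvA_terminal (goal : List Int) (buttons_i : List (List (List Int))) (m d u : Int) (c : List Int)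
    (h : d ≥ (buttons_i.length : Int) ∨ m = u) :
    solve_with_m goal buttons_i m d u c = (c == goal) := by
  rw [solve_with_m.eq_def]; simp only [dif_pos h]

-- A's value where a step is taken: the value at the current state is the `any` of its children
lemma pvA_step (goal : List Int) (buttons_i : List (List (List Int))) (m dd : Int)
    (hdd : dd < (buttons_i.length : Int)) (st : Int × List Int)
    (hterm : pvTerm goal m st = false) :
    (pvStep goal buttons_i m (buttons_i.length : Int) dd st).any
        (fun st' => solve_with_m goal buttons_i m (dd + 1) st'.1 st'.2)
      = solve_with_m goal buttons_i m dd st.1 st.2 := by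
  obtain ⟨uu, cc⟩ := st
  by_cases h1 : m = uu
  · have hgl : (cc == goal) = false := by
      simpa [pvTerm, h1] using hterm
    rw [pvStep, if_pos h1, pvA_terminal goal buttons_i m dd uu cc (Or.inr h1), hgl]
    rfl
  · have hnot : ¬ (dd ≥ (buttons_i.length : Int) ∨ m = uu) := by
      push_neg; exact ⟨hdd, h1⟩
    by_cases h2 : ((goal.zip cc).any fun z => decide (z.2 > z.1)) = true
    · rw [pvStep, if_neg h1, if_pos h2]
      rw [solve_with_m.eq_def]
      simp only [dif_neg hnot, if_pos h2]
      rfl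
    · have hb2 : ((goal.zip cc).any fun z => decide (z.2 > z.1)) = false := Bool.eq_false_iff.mpr h2
      rw [pvStep, if_neg h1, if_neg h2]
      conv_rhs => rw [solve_with_m.eq_def]
      simp only [dif_neg hnot, hb2, Bool.false_eq_true, if_false]
      rw [List.any_cons, pvChildren, List.any_map]
      by_cases h3 : solve_with_m goal buttons_i m (dd + 1) uu cc = true
      · simp [h3]
      · have hb3 : solve_with_m goal buttons_i m (dd + 1) uu cc = false := Bool.eq_false_iff.mpr h3
        simp only [hb3, Bool.false_eq_true, if_false, Bool.false_or]
        apply pvAnyCongr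
        intro i _
        simp [Function.comp, pvChild]

-- the main characterization: the layered search from depth dd on a frontier F computes
-- the disjunction of A's values over F
lemma pvLayersChar (goal : List Int) (buttons_i : List (List (List Int))) (m : Int) :
    ∀ (k : Nat) (dd : Int), (((buttons_i.length : Int) - dd).toNat = k) →
      ∀ F, pvLayers goal buttons_i m (buttons_i.length : Int) dd F
           = F.any (fun st => solve_with_m goal buttons_i m dd st.1 st.2) := by
  intro k
  induction k using Nat.strong_induction_on with
  | _ k IH =>
    intro dd hk F
    rw [pvLayers]
    by_cases hcond : dd < (buttons_i.length : Int) ∧ F ≠ []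
    · simp only [dif_pos hcond]
      obtain ⟨hdd, -⟩ := hcond
      by_cases hfst : (pvExpand goal buttons_i m (buttons_i.length : Int) dd F []).1 = true
      · simp only [hfst, if_true]
        rw [pvExpandFst] at hfst
        rw [List.any_eq_true] at hfst
        obtain ⟨st, hst, hterm⟩ := hfst
        have hA : solve_with_m goal buttons_i m dd st.1 st.2 = true := by
          simp only [pvTerm, Bool.and_eq_true, decide_eq_true_eq] at hterm
          rw [pvA_terminal goal buttons_i m dd st.1 st.2 (Or.inr hterm.1)]
          exact hterm.2
        symm
        rw [List.any_eq_true]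
        exact ⟨st, hst, hA⟩
      · have hfalse : (pvExpand goal buttons_i m (buttons_i.length : Int) dd F []).1 = false :=
          Bool.eq_false_iff.mpr hfst
        simp only [hfalse, Bool.false_eq_true, if_false]
        have hk1 : (((buttons_i.length : Int) - (dd + 1)).toNat) = k - 1 := by omega
        have hklt : k - 1 < k := by omega
        rw [IH (k - 1) hklt (dd + 1) hk1]
        have hmem : ∀ x, x ∈ (pvExpand goal buttons_i m (buttons_i.length : Int) dd F []).2 ↔
            x ∈ F.flatMap (pvStep goal buttons_i m (buttons_i.length : Int) dd) := by
          intro x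
          rw [pvExpandSnd goal buttons_i m (buttons_i.length : Int) dd F [] hfalse x]
          simp only [List.not_mem_nil, false_or]
        rw [pvAnyExt hmem, pvAnyFlatMap]
        apply pvAnyCongr
        intro st hst
        apply pvA_step goal buttons_i m dd hdd st
        rw [pvExpandFst] at hfalse
        exact Bool.eq_false_iff.mpr (List.any_eq_false.mp hfalse st hst)
    · simp only [dif_neg hcond]
      rcases (not_and_or.mp hcond) with h | h
      · have hdd : dd ≥ (buttons_i.length : Int) := by omega
        apply pvAnyCongr
        intro st _
        rw [pvA_terminal goal buttons_i m dd st.1 st.2 (Or.inl hdd)]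
      · have hF : F = [] := by simpa using h
        subst hF; rfl

-- ===== VERDICT (by name: the statement is the Claim_ definition above) =====
theorem solve_with_m_spec : Claim_equal_solve_with_m := by
  intro goal buttons_i m d u c _ _
  unfold Spec_solve_with_m solve_with_m_alt
  rw [pvLayersChar goal buttons_i m (((buttons_i.length : Int) - d).toNat) d rfl [(u, c)]]
  simp
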